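-- pv_equiv track=rewrite | github.com/randyarbolaez/codesignal | daily-challenges/happyNewYear.py | turnSentenceIntoListOfWords
-- ===== SOURCE A (Python) =====
-- def turnSentenceIntoListOfWords(sentence):
--   listOfWords = []
--   lettersBeforeSpace = '* '
--   for i in sentence:
--     if i == ' ':
--       listOfWords.append(lettersBeforeSpace)
--       lettersBeforeSpace = '* '
--     else:
--       lettersBeforeSpace += i
--   listOfWords.append(lettersBeforeSpace)
--   return listOfWords
-- ===== SOURCE B (Python) =====
-- def turnSentenceIntoListOfWords(sentence):
--   return ['* ' + w for w in sentence.split(' ')]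
-- ===== Notes on version B (the rewrite author's own statement) =====
-- stated objective: idiomatic
-- what changed: Replaces the char-by-char accumulator loop with the library splitter: split on an explicit single-space separator, then prepend the marker prefix to each word with a comprehension.
import Mathlib
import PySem

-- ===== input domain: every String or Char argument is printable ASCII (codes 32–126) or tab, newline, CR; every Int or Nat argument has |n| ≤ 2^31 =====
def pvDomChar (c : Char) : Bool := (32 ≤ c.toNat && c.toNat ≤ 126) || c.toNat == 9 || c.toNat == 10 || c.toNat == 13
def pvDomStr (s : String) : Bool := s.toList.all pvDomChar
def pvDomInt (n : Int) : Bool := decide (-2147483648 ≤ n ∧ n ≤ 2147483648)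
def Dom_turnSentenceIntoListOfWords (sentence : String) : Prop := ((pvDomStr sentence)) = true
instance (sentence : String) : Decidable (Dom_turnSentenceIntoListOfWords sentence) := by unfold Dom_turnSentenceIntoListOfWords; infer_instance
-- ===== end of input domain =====

-- B replaces A's char-by-char accumulator loop with split-on-space then mapping the marker prefix over the words (idiomatic; a timing run measured B constant-factor faster).


-- ===== PORT A =====
-- literal port: fold over the characters carrying (listOfWords, lettersBeforeSpace), final append after the loop
def turnSentenceIntoListOfWords (sentence : String) : List String :=
  let r := sentence.toList.foldl
    (fun (st : List String × String) i =>
      if i = ' ' then (st.1 ++ [st.2], "* ") else (st.1, st.2.push i))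
    ([], "* ")
  r.1 ++ [r.2]

-- ===== PORT B =====
-- literal port of Source B: sentence.split(' ') (PySem.Chars.splitOn is split with a nonempty sep), then map '* ' + w
def turnSentenceIntoListOfWords_alt (sentence : String) : List String :=
  (PySem.Chars.splitOn sentence.toList [' ']).map (fun w => "* " ++ String.ofList w)

-- ===== PRECONDITION & SPEC =====
def Spec_turnSentenceIntoListOfWords (sentence : String) (out : List String) : Prop := out = turnSentenceIntoListOfWords_alt sentence
instance (sentence : String) (out : List String) : Decidable (Spec_turnSentenceIntoListOfWords sentence out) := by unfold Spec_turnSentenceIntoListOfWords; infer_instance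

-- ===== CLAIM (what is proved, stated in full; the proofs are below) =====
def Claim_equal_turnSentenceIntoListOfWords : Prop := ∀ (sentence : String), Dom_turnSentenceIntoListOfWords sentence → Spec_turnSentenceIntoListOfWords sentence (turnSentenceIntoListOfWords sentence)

-- ===== LEMMAS AND PROOFS =====

-- reference splitter on a single space, used only in the proofs
def splitSp : List Char → List (List Char)
  | [] => [[]]
  | c :: rest =>
    if c = ' ' then [] :: splitSp rest
    else match splitSp rest with
      | [] => [[c]]
      | w :: ws => (c :: w) :: ws

theorem splitSp_ne_nil (l : List Char) : splitSp l ≠ [] := by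
  cases l with
  | nil => simp [splitSp]
  | cons c rest =>
    simp only [splitSp]
    split_ifs
    · simp
    · cases h : splitSp rest <;> simp

-- prepend a prefix onto the head word
def consHead (x : List Char) : List (List Char) → List (List Char)
  | [] => [x]
  | w :: ws => (x ++ w) :: ws

theorem go_space (fuel : Nat) : ∀ (l cur : List Char) (acc : List (List Char)),
    l.length ≤ fuel →
    PySem.Chars.splitOn.go [' '] fuel l cur acc
      = acc.reverse ++ consHead cur.reverse (splitSp l) := by
  induction fuel with
  | zero =>
    intro l cur acc h
    have : l = [] := by cases l <;> simp_all
    subst this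
    simp [PySem.Chars.splitOn.go, splitSp, consHead]
  | succ f ih =>
    intro l cur acc h
    cases l with
    | nil => simp [PySem.Chars.splitOn.go, splitSp, consHead]
    | cons c rest =>
      simp only [PySem.Chars.splitOn.go]
      by_cases hc : c = ' '
      · subst hc
        have hpre : [' '].isPrefixOf (' ' :: rest) = true := by simp [List.isPrefixOf]
        rw [if_pos hpre]
        have hdrop : List.drop [' '].length (' ' :: rest) = rest := by simp
        rw [hdrop, ih rest [] (cur.reverse :: acc) (by simpa using h)]
        obtain ⟨w, ws, hw⟩ : ∃ w ws, splitSp rest = w :: ws := by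
          cases hsp : splitSp rest with
          | nil => exact absurd hsp (splitSp_ne_nil rest)
          | cons w ws => exact ⟨w, ws, rfl⟩
        simp [splitSp, hw, consHead]
      · have hpre : [' '].isPrefixOf (c :: rest) = false := by
          simp [List.isPrefixOf]
          exact fun h' => (hc h'.symm)
        rw [if_neg (by simp [hpre])]
        rw [ih rest (c :: cur) acc (by simpa using h)]
        obtain ⟨w, ws, hw⟩ : ∃ w ws, splitSp rest = w :: ws := by
          cases hsp : splitSp rest with
          | nil => exact absurd hsp (splitSp_ne_nil rest)
          | cons w ws => exact ⟨w, ws, rfl⟩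
        simp [splitSp, hc, hw, consHead]

theorem splitOn_space (cs : List Char) :
    PySem.Chars.splitOn cs [' '] = splitSp cs := by
  unfold PySem.Chars.splitOn
  rw [go_space (cs.length + 1) cs [] [] (by omega)]
  obtain ⟨w, ws, hw⟩ : ∃ w ws, splitSp cs = w :: ws := by
    cases hsp : splitSp cs with
    | nil => exact absurd hsp (splitSp_ne_nil cs)
    | cons w ws => exact ⟨w, ws, rfl⟩
  simp [hw, consHead]

-- head word gets `cur`, the rest get the fresh "* " prefix
def mapWords (cur : String) : List (List Char) → List String
  | [] => [cur]
  | w :: ws => (cur ++ String.ofList w) :: ws.map (fun w => "* " ++ String.ofList w)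

theorem push_append_ofList (cur : String) (c : Char) (w : List Char) :
    cur.push c ++ String.ofList w = cur ++ String.ofList (c :: w) := by
  apply String.toList_inj.mp
  simp

theorem foldA_inv : ∀ (l : List Char) (lst : List String) (cur : String),
    (l.foldl
      (fun (st : List String × String) i =>
        if i = ' ' then (st.1 ++ [st.2], "* ") else (st.1, st.2.push i)) (lst, cur)).1
    ++ [(l.foldl
      (fun (st : List String × String) i =>
        if i = ' ' then (st.1 ++ [st.2], "* ") else (st.1, st.2.push i)) (lst, cur)).2]
    = lst ++ mapWords cur (splitSp l) := by
  intro l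
  induction l with
  | nil =>
    intro lst cur
    simp [mapWords, splitSp]
  | cons c rest ih =>
    intro lst cur
    by_cases hc : c = ' '
    · subst hc
      rw [List.foldl_cons, if_pos rfl, ih (lst ++ [cur]) "* "]
      obtain ⟨w, ws, hw⟩ : ∃ w ws, splitSp rest = w :: ws := by
        cases hsp : splitSp rest with
        | nil => exact absurd hsp (splitSp_ne_nil rest)
        | cons w ws => exact ⟨w, ws, rfl⟩
      simp [splitSp, hw, mapWords]
    · rw [List.foldl_cons, if_neg hc, ih lst (cur.push c)]
      obtain ⟨w, ws, hw⟩ : ∃ w ws, splitSp rest = w :: ws := by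
        cases hsp : splitSp rest with
        | nil => exact absurd hsp (splitSp_ne_nil rest)
        | cons w ws => exact ⟨w, ws, rfl⟩
      simp [splitSp, hc, hw, mapWords, push_append_ofList]

theorem mapWords_star (ws : List (List Char)) (h : ws ≠ []) :
    mapWords "* " ws = ws.map (fun w => "* " ++ String.ofList w) := by
  cases ws with
  | nil => exact absurd rfl h
  | cons w ws => simp [mapWords]

-- ===== VERDICT (by name: the statement is the Claim_ definition above) =====
theorem turnSentenceIntoListOfWords_spec : Claim_equal_turnSentenceIntoListOfWords := by
  intro sentence _
  unfold Spec_turnSentenceIntoListOfWords turnSentenceIntoListOfWords turnSentenceIntoListOfWords_alt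
  rw [splitOn_space]
  rw [foldA_inv sentence.toList [] "* "]
  rw [mapWords_star _ (splitSp_ne_nil _)]
  simp
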